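-- pv_equiv track=rewrite | github.com/Ava-Khan/BMSTU_Python_PortuzenkovIR | labaratory_work_06/labarotory_work_06_01.py | sum_el
-- ===== SOURCE A (Python) =====
-- def sum_el(matr):
--     sum_total = 0
--     results = []
--     for i in range(0, len(matr)):
--         flag = True
--         buf = 0
--         for j in range(0, len(matr)):
--             if matr[j][i] < 0:
--                 flag = False
--             buf += matr[j][i]
--         if flag:
--             sum_total += buf
--             results.append((i, buf))
--     return sum_total, results
-- ===== SOURCE B (Python) =====
-- def sum_el(matr):
--     n = len(matr)
--     col_sums = [0] * n
--     col_ok = [True] * n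
--     for j in range(0, n):
--         for i in range(0, n):
--             v = matr[j][i]
--             col_sums[i] = col_sums[i] + v
--             if v < 0:
--                 col_ok[i] = False
--     sum_total = 0
--     results = []
--     for i in range(0, n):
--         if col_ok[i]:
--             sum_total += col_sums[i]
--             results.append((i, col_sums[i]))
--     return sum_total, results
-- ===== Notes on version B (the rewrite author's own statement) =====
-- stated objective: alternative
-- what changed: A scans the matrix column-by-column recomputing a flag/accumulator per column; B makes one row-major pass maintaining parallel arrays col_sums/col_ok for all columns at once, then a final scan over columns builds the result.
import Mathlib
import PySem

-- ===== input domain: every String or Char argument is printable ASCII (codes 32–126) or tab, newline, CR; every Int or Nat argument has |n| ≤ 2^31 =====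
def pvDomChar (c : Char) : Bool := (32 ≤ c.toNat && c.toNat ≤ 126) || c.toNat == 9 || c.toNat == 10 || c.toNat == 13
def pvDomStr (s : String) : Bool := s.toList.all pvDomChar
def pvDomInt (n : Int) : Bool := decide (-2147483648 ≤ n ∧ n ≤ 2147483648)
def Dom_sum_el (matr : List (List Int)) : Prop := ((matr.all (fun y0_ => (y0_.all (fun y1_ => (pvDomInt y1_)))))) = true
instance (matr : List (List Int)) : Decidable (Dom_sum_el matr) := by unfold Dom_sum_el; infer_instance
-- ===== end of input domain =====

-- B changes the decomposition only (one row-major pass with parallel per-column arrays instead of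
-- A's column-by-column scans); same asymptotic cost, return values proved equal under Pre_.

-- matr[j][i], total under Pre_ (exact there: both indices are in range)
def pvV (matr : List (List Int)) (j i : Int) : Int :=
  PySem.List.pyGetD (PySem.List.pyGetD matr j []) i 0

-- ===== PORT A =====
def sum_el (matr : List (List Int)) : Int × (List (Int × Int)) :=
  let n : Int := matr.length
  (PySem.List.pyRange 0 n 1).foldl (fun (acc : Int × List (Int × Int)) i =>
    let fb := (PySem.List.pyRange 0 n 1).foldl (fun (fb : Bool × Int) j =>
      (if pvV matr j i < 0 then false else fb.1, fb.2 + pvV matr j i)) (true, 0)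
    if fb.1 then (acc.1 + fb.2, acc.2 ++ [(i, fb.2)]) else acc) (0, [])

-- ===== PORT B =====
def sum_el_alt (matr : List (List Int)) : Int × (List (Int × Int)) :=
  let n : Int := matr.length
  let st := (PySem.List.pyRange 0 n 1).foldl (fun (st : List Int × List Bool) j =>
      (PySem.List.pyRange 0 n 1).foldl (fun (st : List Int × List Bool) i =>
        (PySem.List.pySetD st.1 i (PySem.List.pyGetD st.1 i 0 + pvV matr j i),
         if pvV matr j i < 0 then PySem.List.pySetD st.2 i false else st.2)) st)
    (List.replicate matr.length 0, List.replicate matr.length true)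
  (PySem.List.pyRange 0 n 1).foldl (fun (acc : Int × List (Int × Int)) i =>
    if PySem.List.pyGetD st.2 i true then
      (acc.1 + PySem.List.pyGetD st.1 i 0, acc.2 ++ [(i, PySem.List.pyGetD st.1 i 0)])
    else acc) (0, [])

-- ===== PRECONDITION & SPEC =====
-- Pre_ excludes exactly the inputs where the Python A raises IndexError: some row shorter than
-- len(matr) (the code assumes a square matrix).  A returns normally on every other input.
def Pre_sum_el (matr : List (List Int)) : Prop := ∀ row ∈ matr, matr.length ≤ row.length
instance (matr : List (List Int)) : Decidable (Pre_sum_el matr) := by unfold Pre_sum_el; infer_instance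
def pvWitness_sum_el : List (List Int) := [[1, 2], [3, -4]]
def Spec_sum_el (matr : List (List Int)) (out : Int × (List (Int × Int))) : Prop := out = sum_el_alt matr
instance (matr : List (List Int)) (out : Int × (List (Int × Int))) : Decidable (Spec_sum_el matr out) := by unfold Spec_sum_el; infer_instance

-- ===== CLAIM (what is proved, stated in full; the proofs are below) =====
def Claim_equal_sum_el : Prop := ∀ (matr : List (List Int)), Dom_sum_el matr → Pre_sum_el matr → Spec_sum_el matr (sum_el matr)

-- ===== LEMMAS AND PROOFS =====

-- length is preserved by folding a length-preserving step over a range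
lemma pv_fold_len {α : Type} (step : List α → Int → List α)
    (hlen : ∀ s i, (step s i).length = s.length) :
    ∀ (m : ℕ) (l : List α),
      ((PySem.List.pyRange 0 (m : Int) 1).foldl step l).length = l.length := by
  intro m
  induction m with
  | zero => intro l; simp [PySem.List.pyRange_one_eq_nil]
  | succ m ih =>
      intro l
      rw [show ((m + 1 : ℕ) : Int) = (m : Int) + 1 by push_cast; ring,
          PySem.List.pyRange_one_succ_right (by exact_mod_cast Nat.zero_le m),
          List.foldl_append]
      simp [hlen, ih]

-- pointwise effect of folding a per-index update over range(0, m)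
lemma pv_fold_set_point {α : Type} (step : List α → Int → List α) (u : ℕ → α → α) (d : α)
    (hlen : ∀ s i, (step s i).length = s.length)
    (hget : ∀ (s : List α) (i k : ℕ), i < s.length →
      (step s (i : Int)).getD k d = if k = i then u i (s.getD k d) else s.getD k d) :
    ∀ (m : ℕ) (l : List α) (k : ℕ), m ≤ l.length →
      ((PySem.List.pyRange 0 (m : Int) 1).foldl step l).getD k d
        = if k < m then u k (l.getD k d) else l.getD k d := by
  intro m
  induction m with
  | zero => intro l k _; simp [PySem.List.pyRange_one_eq_nil]
  | succ m ih =>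
      intro l k hm
      rw [show ((m + 1 : ℕ) : Int) = (m : Int) + 1 by push_cast; ring,
          PySem.List.pyRange_one_succ_right (by exact_mod_cast Nat.zero_le m),
          List.foldl_append]
      simp only [List.foldl_cons, List.foldl_nil]
      rw [hget _ m k (by rw [pv_fold_len step hlen]; omega)]
      by_cases hk : k = m
      · subst hk
        rw [ih l k (by omega)]
        simp
      · rw [ih l k (by omega)]
        by_cases h2 : k < m
        · simp [hk, h2, Nat.lt_succ_of_lt h2]
        · have : ¬ k < m + 1 := by omega
          simp [hk, h2, this]

-- pointwise effect of folding rows, each row acting per-index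
lemma pv_fold_rows_point {α : Type} (n0 : ℕ) (inner : List α → Int → List α)
    (u : Int → ℕ → α → α) (d : α)
    (hlen : ∀ l j, l.length = n0 → (inner l j).length = n0)
    (hpt : ∀ (l : List α) (j : Int) (k : ℕ), l.length = n0 → k < n0 →
      (inner l j).getD k d = u j k (l.getD k d)) :
    ∀ (js : List Int) (l : List α) (k : ℕ), l.length = n0 → k < n0 →
      (js.foldl inner l).getD k d = js.foldl (fun a j => u j k a) (l.getD k d) := by
  intro js
  induction js with
  | nil => intro l k _ _; simp
  | cons j js ih =>
      intro l k hl hk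
      simp only [List.foldl_cons]
      rw [ih (inner l j) k (hlen l j hl) hk, hpt l j k hl hk]

-- splitting a fold whose state is a pair of independently-updated components
lemma pv_foldl_split {α β γ : Type} (f : α → γ → α) (g : β → γ → β) :
    ∀ (l : List γ) (a : α) (b : β),
      l.foldl (fun p e => (f p.1 e, g p.2 e)) (a, b) = (l.foldl f a, l.foldl g b) := by
  intro l
  induction l with
  | nil => intro a b; simp
  | cons x xs ih => intro a b; simp [ih]

-- B's per-row, per-column updates and the accumulated column arrays (proof-only names)
def pvInnerS (matr : List (List Int)) (j : Int) (s : List Int) (i : Int) : List Int :=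
  PySem.List.pySetD s i (PySem.List.pyGetD s i 0 + pvV matr j i)
def pvInnerO (matr : List (List Int)) (j : Int) (o : List Bool) (i : Int) : List Bool :=
  if pvV matr j i < 0 then PySem.List.pySetD o i false else o
def pvS (matr : List (List Int)) : List Int :=
  (PySem.List.pyRange 0 (matr.length : Int) 1).foldl
    (fun s j => (PySem.List.pyRange 0 (matr.length : Int) 1).foldl (pvInnerS matr j) s)
    (List.replicate matr.length 0)
def pvO (matr : List (List Int)) : List Bool :=
  (PySem.List.pyRange 0 (matr.length : Int) 1).foldl
    (fun o j => (PySem.List.pyRange 0 (matr.length : Int) 1).foldl (pvInnerO matr j) o)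
    (List.replicate matr.length true)

lemma pvInnerS_len (matr : List (List Int)) (j : Int) (s : List Int) (i : Int) :
    (pvInnerS matr j s i).length = s.length := by
  simp [pvInnerS, PySem.List.length_pySetD]

lemma pvInnerO_len (matr : List (List Int)) (j : Int) (o : List Bool) (i : Int) :
    (pvInnerO matr j o i).length = o.length := by
  unfold pvInnerO; split <;> simp [PySem.List.length_pySetD]

lemma pvInnerS_getD (matr : List (List Int)) (j : Int) (s : List Int) (i k : ℕ)
    (hi : i < s.length) :
    (pvInnerS matr j s (i : Int)).getD k 0
      = if k = i then s.getD k 0 + pvV matr j (i : Int) else s.getD k 0 := by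
  by_cases hk : k = i
  · subst hk; simp [pvInnerS, List.getD, hi]
  · simp [pvInnerS, List.getD, hk, Ne.symm hk]

lemma pvInnerO_getD (matr : List (List Int)) (j : Int) (o : List Bool) (i k : ℕ)
    (hi : i < o.length) :
    (pvInnerO matr j o (i : Int)).getD k true
      = if k = i then (if pvV matr j (i : Int) < 0 then false else o.getD k true)
        else o.getD k true := by
  by_cases hv : pvV matr j (i : Int) < 0 <;> by_cases hk : k = i
  · subst hk; simp [pvInnerO, hv, List.getD, hi]
  · simp [pvInnerO, hv, List.getD, hk, Ne.symm hk]
  · subst hk; simp [pvInnerO, hv]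
  · simp [pvInnerO, hv, hk]

lemma pvS_getD (matr : List (List Int)) (k : ℕ) (hk : k < matr.length) :
    (pvS matr).getD k 0
      = (PySem.List.pyRange 0 (matr.length : Int) 1).foldl
          (fun a j => a + pvV matr j (k : Int)) 0 := by
  have h := pv_fold_rows_point matr.length
      (fun s j => (PySem.List.pyRange 0 (matr.length : Int) 1).foldl (pvInnerS matr j) s)
      (fun j k' a => a + pvV matr j (k' : Int)) 0
      (fun l j hl => by
        rw [pv_fold_len (pvInnerS matr j) (pvInnerS_len matr j)]; exact hl)
      (fun l j k' hl hk' => by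
        rw [pv_fold_set_point (pvInnerS matr j) (fun i a => a + pvV matr j (i : Int)) 0
              (pvInnerS_len matr j) (pvInnerS_getD matr j) matr.length l k' (le_of_eq hl.symm)]
        simp [hk'])
      (PySem.List.pyRange 0 (matr.length : Int) 1)
      (List.replicate matr.length 0) k (by simp) hk
  rw [pvS, h]
  simp [hk]

lemma pvO_getD (matr : List (List Int)) (k : ℕ) (hk : k < matr.length) :
    (pvO matr).getD k true
      = (PySem.List.pyRange 0 (matr.length : Int) 1).foldl
          (fun a j => if pvV matr j (k : Int) < 0 then false else a) true := by
  have h := pv_fold_rows_point matr.length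
      (fun o j => (PySem.List.pyRange 0 (matr.length : Int) 1).foldl (pvInnerO matr j) o)
      (fun j k' a => if pvV matr j (k' : Int) < 0 then false else a) true
      (fun l j hl => by
        rw [pv_fold_len (pvInnerO matr j) (pvInnerO_len matr j)]; exact hl)
      (fun l j k' hl hk' => by
        rw [pv_fold_set_point (pvInnerO matr j)
              (fun i a => if pvV matr j (i : Int) < 0 then false else a) true
              (pvInnerO_len matr j) (pvInnerO_getD matr j) matr.length l k' (le_of_eq hl.symm)]
        simp [hk'])
      (PySem.List.pyRange 0 (matr.length : Int) 1)
      (List.replicate matr.length true) k (by simp) hk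
  rw [pvO, h]
  simp [hk]

-- B's row pass computes exactly the pair of column arrays
lemma pv_st_eq (matr : List (List Int)) :
    (PySem.List.pyRange 0 (matr.length : Int) 1).foldl
      (fun (st : List Int × List Bool) j =>
        (PySem.List.pyRange 0 (matr.length : Int) 1).foldl
          (fun (st : List Int × List Bool) i =>
            (PySem.List.pySetD st.1 i (PySem.List.pyGetD st.1 i 0 + pvV matr j i),
             if pvV matr j i < 0 then PySem.List.pySetD st.2 i false else st.2)) st)
      (List.replicate matr.length 0, List.replicate matr.length true)
    = (pvS matr, pvO matr) := by
  have hfun : (fun (st : List Int × List Bool) j =>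
        (PySem.List.pyRange 0 (matr.length : Int) 1).foldl
          (fun (st : List Int × List Bool) i =>
            (PySem.List.pySetD st.1 i (PySem.List.pyGetD st.1 i 0 + pvV matr j i),
             if pvV matr j i < 0 then PySem.List.pySetD st.2 i false else st.2)) st)
      = fun (st : List Int × List Bool) j =>
          ((PySem.List.pyRange 0 (matr.length : Int) 1).foldl (pvInnerS matr j) st.1,
           (PySem.List.pyRange 0 (matr.length : Int) 1).foldl (pvInnerO matr j) st.2) := by
    funext st j
    cases st with
    | mk a b =>
      exact pv_foldl_split (pvInnerS matr j) (pvInnerO matr j)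
        (PySem.List.pyRange 0 (matr.length : Int) 1) a b
  rw [hfun]
  exact pv_foldl_split
    (fun s j => (PySem.List.pyRange 0 (matr.length : Int) 1).foldl (pvInnerS matr j) s)
    (fun o j => (PySem.List.pyRange 0 (matr.length : Int) 1).foldl (pvInnerO matr j) o)
    (PySem.List.pyRange 0 (matr.length : Int) 1)
    (List.replicate matr.length 0) (List.replicate matr.length true)

lemma pv_ports_eq (matr : List (List Int)) : sum_el matr = sum_el_alt matr := by
  unfold sum_el sum_el_alt
  simp only [pv_st_eq]
  refine PySem.List.foldl_congr_mem _ _ _ _ ?_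
  intro acc i hi
  obtain ⟨h0, hn⟩ := PySem.List.mem_pyRange_one.mp hi
  obtain ⟨k, rfl, hk⟩ : ∃ k : ℕ, (k : Int) = i ∧ k < matr.length :=
    ⟨i.toNat, Int.toNat_of_nonneg h0, by omega⟩
  rw [pv_foldl_split (fun f j => if pvV matr j (k : Int) < 0 then false else f)
        (fun b j => b + pvV matr j (k : Int))
        (PySem.List.pyRange 0 (matr.length : Int) 1) true 0]
  simp only [PySem.List.pyGetD_natCast, pvS_getD matr k hk, pvO_getD matr k hk]

-- ===== VERDICT (by name: the statement is the Claim_ definition above) =====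
theorem sum_el_spec : Claim_equal_sum_el := by
  intro matr _ _
  exact pv_ports_eq matr
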